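-- pv_equiv track=rewrite | github.com/TDPessoa/cs50p | problem_set_5/test_plates/plates.py | no_first_zero
-- ===== SOURCE A (Python) =====
-- NUMBERS = ('0', '1', '2', '3', '4', '5', '6', '7', '8', '9')
--
-- def no_first_zero(plate):
--     num_count = 0
--     for c in plate:
--         if (c in NUMBERS) and \
--                 (c != '0'):
--             num_count += 1
--
--         elif num_count != 0:
--             break
--
--         elif c == '0':
--             return False
--
--         else:
--             pass
--     return True
-- ===== SOURCE B (Python) =====
-- NUMBERS = ('0', '1', '2', '3', '4', '5', '6', '7', '8', '9')
--
-- def no_first_zero(plate):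
--     digits = [c for c in plate if c in NUMBERS]
--     return digits[:1] != ['0']
-- ===== Notes on version B (the rewrite author's own statement) =====
-- stated objective: alternative
-- what changed: B works in two staged passes: it first extracts the whole digit subsequence with a filter comprehension, then decides by comparing its one-element prefix with ['0'], instead of A's single scan with a num_count accumulator and a four-way branch with break/return.
import Mathlib
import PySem

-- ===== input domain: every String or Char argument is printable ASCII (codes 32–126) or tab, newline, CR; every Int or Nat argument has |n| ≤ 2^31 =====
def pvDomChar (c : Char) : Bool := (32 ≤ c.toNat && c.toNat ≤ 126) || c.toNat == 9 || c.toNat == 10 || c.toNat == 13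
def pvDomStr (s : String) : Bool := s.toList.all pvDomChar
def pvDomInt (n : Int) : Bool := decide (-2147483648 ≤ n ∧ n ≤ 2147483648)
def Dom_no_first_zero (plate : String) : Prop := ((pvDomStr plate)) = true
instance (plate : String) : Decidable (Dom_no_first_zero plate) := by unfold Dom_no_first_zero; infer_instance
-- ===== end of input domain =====

-- B replaces A's single scan with num_count and four-way branch by two staged passes: filter out the digit subsequence, then compare its one-element prefix with ['0'] (alternative decomposition).


-- NUMBERS = ('0', …, '9')
def pyNUMBERS : List Char := ['0','1','2','3','4','5','6','7','8','9']

-- ===== PORT A =====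
-- A's loop with its num_count accumulator; break and `return True` both yield true.
def noFirstZeroLoop : List Char → Nat → Bool
  | [], _ => true
  | c :: rest, numCount =>
    if pyNUMBERS.contains c && c != '0' then noFirstZeroLoop rest (numCount + 1)
    else if numCount ≠ 0 then true            -- break, then `return True`
    else if c == '0' then false
    else noFirstZeroLoop rest numCount        -- pass

def no_first_zero (plate : String) : Bool := noFirstZeroLoop plate.toList 0

-- ===== PORT B =====
-- B: digits = [c for c in plate if c in NUMBERS]; return digits[:1] != ['0']
def no_first_zero_alt (plate : String) : Bool :=
  let digits := plate.toList.filter (fun c => pyNUMBERS.contains c)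
  decide (digits.take 1 ≠ ['0'])

-- ===== PRECONDITION & SPEC =====
def Spec_no_first_zero (plate : String) (out : Bool) : Prop := out = no_first_zero_alt plate
instance (plate : String) (out : Bool) : Decidable (Spec_no_first_zero plate out) := by unfold Spec_no_first_zero; infer_instance

-- ===== CLAIM (what is proved, stated in full; the proofs are below) =====
def Claim_equal_no_first_zero : Prop := ∀ (plate : String), Dom_no_first_zero plate → Spec_no_first_zero plate (no_first_zero plate)

-- ===== LEMMAS AND PROOFS =====

-- Once num_count is positive, A's loop always ends in True.
theorem noFirstZeroLoop_pos (l : List Char) (n : Nat) (hn : n ≠ 0) :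
    noFirstZeroLoop l n = true := by
  induction l generalizing n with
  | nil => rfl
  | cons c rest ih =>
    simp only [noFirstZeroLoop]
    split
    · exact ih (n + 1) (Nat.succ_ne_zero n)
    · simp [hn]

theorem noFirstZeroLoop_zero (l : List Char) :
    noFirstZeroLoop l 0 = decide ((l.filter (fun c => pyNUMBERS.contains c)).take 1 ≠ ['0']) := by
  induction l with
  | nil => rfl
  | cons c rest ih =>
    simp only [noFirstZeroLoop, List.filter_cons, List.contains_eq_mem]
    by_cases hd : c ∈ pyNUMBERS
    · by_cases hz : c = '0'
      · subst hz; simp [hd]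
      · simp [hd, hz, noFirstZeroLoop_pos rest 1 Nat.one_ne_zero]
    · have hz : c ≠ '0' := fun h => hd (by subst h; decide)
      simp [hd, hz, ih]

-- ===== VERDICT (by name: the statement is the Claim_ definition above) =====
theorem no_first_zero_spec : Claim_equal_no_first_zero := by
  intro plate _
  unfold Spec_no_first_zero no_first_zero no_first_zero_alt
  exact noFirstZeroLoop_zero plate.toList
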